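-- pv_equiv track=rewrite | github.com/pachterlab/varseek | varseek/utils/varseek_fastqpp_utils.py | split_qualities_based_on_sequence
-- ===== SOURCE A (Python) =====
-- def split_qualities_based_on_sequence(nucleotide_sequence, quality_score_sequence):
--     # Step 1: Split the original sequence by the delimiter and get the fragments
--     fragments = nucleotide_sequence.split("N")
--
--     # Step 2: Calculate the lengths of the fragments
--     lengths = [len(fragment) for fragment in fragments]
--
--     # Step 3: Use these lengths to split the associated sequence
--     split_quality_score_sequence = []
--     start = 0
--     for length in lengths:
--         split_quality_score_sequence.append(quality_score_sequence[start : (start + length)])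
--         start += length + 1
--
--     return split_quality_score_sequence
-- ===== SOURCE B (Python) =====
-- def split_qualities_based_on_sequence(nucleotide_sequence, quality_score_sequence):
--     # Single pass over the nucleotide sequence: build each quality fragment
--     # directly, cutting at every 'N', without computing nucleotide fragments.
--     n = len(quality_score_sequence)
--     result = []
--     frag = []
--     for i, ch in enumerate(nucleotide_sequence):
--         if ch == "N":
--             result.append("".join(frag))
--             frag = []
--         elif i < n:
--             frag.append(quality_score_sequence[i])
--     result.append("".join(frag))
--     return result
-- ===== Notes on version B (the rewrite author's own statement) =====
-- stated objective: simpler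
-- what changed: Replaces split-by-N plus fragment-length bookkeeping and repeated slicing with one enumerate pass over the nucleotide sequence that accumulates quality characters directly and cuts at each 'N'.
import Mathlib
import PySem

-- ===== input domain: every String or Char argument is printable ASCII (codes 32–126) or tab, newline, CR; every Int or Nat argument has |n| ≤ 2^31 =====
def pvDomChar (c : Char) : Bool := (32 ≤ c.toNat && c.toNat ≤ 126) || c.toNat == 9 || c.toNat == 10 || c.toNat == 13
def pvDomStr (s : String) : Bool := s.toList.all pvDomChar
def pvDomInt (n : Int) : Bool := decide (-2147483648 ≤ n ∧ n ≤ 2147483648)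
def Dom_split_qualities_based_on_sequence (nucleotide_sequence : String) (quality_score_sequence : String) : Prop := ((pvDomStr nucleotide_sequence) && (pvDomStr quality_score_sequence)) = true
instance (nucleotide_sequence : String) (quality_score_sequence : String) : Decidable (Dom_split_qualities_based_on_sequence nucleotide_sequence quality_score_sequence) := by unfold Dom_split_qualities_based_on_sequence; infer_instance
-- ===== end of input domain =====

-- B replaces split-by-"N" plus fragment-length bookkeeping and slicing with one
-- enumerate pass that accumulates quality characters directly (objective: simpler).


-- ===== PORT A =====
-- literal transliteration of A: split on "N", take fragment lengths, slice the
-- quality string with a running start offset ('.getD []' only totalizes split?,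
-- which is 'some' here since the separator "N" is nonempty)
def split_qualities_based_on_sequence (nucleotide_sequence : String) (quality_score_sequence : String) : List String :=
  let fragments := (PySem.Str.split? nucleotide_sequence "N").getD []
  let lengths := fragments.map (fun fragment => PySem.Str.len fragment)
  let r := lengths.foldl
    (fun (st : List String × Int) length =>
      (st.1 ++ [PySem.Str.slice quality_score_sequence (some st.2) (some (st.2 + length))],
       st.2 + length + 1))
    ([], 0)
  r.1

-- ===== PORT B =====
-- literal transliteration of B: one pass over enumerate(nucleotide_sequence),
-- accumulating the current quality fragment; cut on 'N'; the guard i < n makes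
-- the indexing total (pyGetD's default is never read under the guard)
def split_qualities_based_on_sequence_alt (nucleotide_sequence : String) (quality_score_sequence : String) : List String :=
  let n := PySem.Str.len quality_score_sequence
  let fin := (PySem.List.enumerate nucleotide_sequence.toList 0).foldl
    (fun (st : List String × List Char) p =>
      if p.2 == 'N' then (st.1 ++ [String.ofList st.2], ([] : List Char))
      else if p.1 < n then (st.1, st.2 ++ [PySem.List.pyGetD quality_score_sequence.toList p.1 ' '])
      else st)
    ([], [])
  fin.1 ++ [String.ofList fin.2]

-- ===== PRECONDITION & SPEC =====
def Spec_split_qualities_based_on_sequence (nucleotide_sequence : String) (quality_score_sequence : String) (out : List String) : Prop := out = split_qualities_based_on_sequence_alt nucleotide_sequence quality_score_sequence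
instance (nucleotide_sequence : String) (quality_score_sequence : String) (out : List String) : Decidable (Spec_split_qualities_based_on_sequence nucleotide_sequence quality_score_sequence out) := by unfold Spec_split_qualities_based_on_sequence; infer_instance

-- ===== CLAIM (what is proved, stated in full; the proofs are below) =====
def Claim_equal_split_qualities_based_on_sequence : Prop := ∀ (nucleotide_sequence : String) (quality_score_sequence : String), Dom_split_qualities_based_on_sequence nucleotide_sequence quality_score_sequence → Spec_split_qualities_based_on_sequence nucleotide_sequence quality_score_sequence (split_qualities_based_on_sequence nucleotide_sequence quality_score_sequence)

-- ===== LEMMAS AND PROOFS =====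

theorem pv_modifyHead_self {α : Type} (l : List α) : l.modifyHead (fun x => x) = l := by
  cases l <;> rfl

-- PySem.Chars.splitOn with the one-character separator ['N'] is List.splitOnP
theorem pv_go_eq (l : List Char) : ∀ (fuel : Nat) (cur : List Char) (acc : List (List Char)),
    l.length < fuel →
    PySem.Chars.splitOn.go ['N'] fuel l cur acc
      = acc.reverse ++ (List.splitOnP (fun c => c == 'N') l).modifyHead (cur.reverse ++ ·) := by
  induction l with
  | nil =>
    intro fuel cur acc h
    cases fuel with
    | zero => omega
    | succ f => simp [PySem.Chars.splitOn.go, List.splitOnP_nil]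
  | cons c rest ih =>
    intro fuel cur acc h
    cases fuel with
    | zero => omega
    | succ f =>
      rw [PySem.Chars.splitOn.go]
      by_cases hc : c = 'N'
      · subst hc
        rw [if_pos (by simp [List.isPrefixOf])]
        have hdrop : List.drop (['N'] : List Char).length ('N' :: rest) = rest := by simp
        rw [hdrop, ih f [] (cur.reverse :: acc) (by simp at h; omega)]
        rw [List.splitOnP_cons]
        simp only [beq_self_eq_true, if_true, List.modifyHead,
          List.reverse_cons, List.append_assoc, List.singleton_append]
        cases hsp : List.splitOnP (fun c => c == 'N') rest with
        | nil => exact absurd hsp (List.splitOnP_ne_nil _ _)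
        | cons a l => simp
      · have hpre : List.isPrefixOf ['N'] (c :: rest) = false := by
          simp [List.isPrefixOf]
          intro h'; exact absurd h'.symm hc
        simp only [hpre, Bool.false_eq_true, if_false]
        rw [ih f (c :: cur) acc (by simp at h ⊢; omega)]
        rw [List.splitOnP_cons]
        have hbc : (c == 'N') = false := by simp [hc]
        rw [hbc]
        simp only [Bool.false_eq_true, if_false]
        obtain ⟨p, ps, hps⟩ := List.exists_cons_of_ne_nil (List.splitOnP_ne_nil (fun c => c == 'N') rest)
        rw [hps]
        simp [List.modifyHead]

theorem pv_splitOn_eq (cs : List Char) :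
    PySem.Chars.splitOn cs ['N'] = List.splitOnP (fun c => c == 'N') cs := by
  rw [PySem.Chars.splitOn, pv_go_eq cs (cs.length + 1) [] [] (by omega)]
  obtain ⟨p, ps, hps⟩ := List.exists_cons_of_ne_nil (List.splitOnP_ne_nil (fun c => c == 'N') cs)
  rw [hps]; simp [List.modifyHead]

-- the common specification: quality slices at the fragment positions
def pv_qslices : List (List Char) → Nat → List Char → List (List Char)
  | [], _, _ => []
  | p :: ps, s, q => ((q.drop s).take p.length) :: pv_qslices ps (s + p.length + 1) q

-- A's fold over the fragment lengths computes pv_qslices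
theorem pv_a_fold (qs : String) (parts : List (List Char)) :
    ∀ (s : Nat) (acc : List String),
    ((parts.map (fun p => PySem.Str.len (String.ofList p))).foldl
      (fun (st : List String × Int) length =>
        (st.1 ++ [PySem.Str.slice qs (some st.2) (some (st.2 + length))],
         st.2 + length + 1)) (acc, (s : Int))).1
      = acc ++ (pv_qslices parts s qs.toList).map String.ofList := by
  induction parts with
  | nil => intro s acc; simp [pv_qslices]
  | cons p ps ih =>
    intro s acc
    simp only [List.map_cons, List.foldl_cons]
    have hlen : PySem.Str.len (String.ofList p) = (p.length : Int) := by
      simp [PySem.Str.len_eq]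
    have hslice : PySem.Str.slice qs (some (s : Int)) (some ((s : Int) + (p.length : Int)))
        = String.ofList ((qs.toList.drop s).take p.length) := by
      apply String.toList_injective
      simp [PySem.Str.toList_slice, PySem.List.slice_natCast_add]
    have hcast : (s : Int) + (p.length : Int) + 1 = ((s + p.length + 1 : Nat) : Int) := by
      push_cast; ring
    rw [hlen, hslice, hcast, ih (s + p.length + 1) (acc ++ [String.ofList ((qs.toList.drop s).take p.length)])]
    simp [pv_qslices]

-- B's enumerate fold computes pv_qslices with the pending fragment prefixed
theorem pv_b_fold (q : List Char) (cs : List Char) :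
    ∀ (s : Nat) (acc : List String) (frag : List Char),
    (((PySem.List.enumerate cs (s : Int)).foldl
      (fun (st : List String × List Char) p =>
        if p.2 == 'N' then (st.1 ++ [String.ofList st.2], ([] : List Char))
        else if p.1 < (q.length : Int) then (st.1, st.2 ++ [PySem.List.pyGetD q p.1 ' '])
        else st) (acc, frag)).1
     ++ [String.ofList (((PySem.List.enumerate cs (s : Int)).foldl
      (fun (st : List String × List Char) p =>
        if p.2 == 'N' then (st.1 ++ [String.ofList st.2], ([] : List Char))
        else if p.1 < (q.length : Int) then (st.1, st.2 ++ [PySem.List.pyGetD q p.1 ' '])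
        else st) (acc, frag)).2)])
      = acc ++ ((pv_qslices (List.splitOnP (fun c => c == 'N') cs) s q).modifyHead (frag ++ ·)).map String.ofList := by
  induction cs with
  | nil => intro s acc frag; simp [PySem.List.enumerate_nil, List.splitOnP_nil, pv_qslices]
  | cons c rest ih =>
    intro s acc frag
    rw [PySem.List.enumerate_cons]
    simp only [List.foldl_cons]
    by_cases hc : c = 'N'
    · subst hc
      simp only [beq_self_eq_true, if_true]
      have hcast : (s : Int) + 1 = ((s + 1 : Nat) : Int) := by push_cast; ring
      rw [hcast, ih (s + 1) (acc ++ [String.ofList frag]) []]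
      rw [List.splitOnP_cons]
      simp [pv_qslices, pv_modifyHead_self]
    · have hbc : (c == 'N') = false := by simp [hc]
      rw [hbc]
      simp only [Bool.false_eq_true, if_false]
      rw [List.splitOnP_cons, hbc]
      simp only [Bool.false_eq_true, if_false]
      obtain ⟨p, ps, hps⟩ := List.exists_cons_of_ne_nil (List.splitOnP_ne_nil (fun c => c == 'N') rest)
      rw [hps]
      have hcast : (s : Int) + 1 = ((s + 1 : Nat) : Int) := by push_cast; ring
      by_cases hlt : s < q.length
      · have hlt' : (s : Int) < (q.length : Int) := by exact_mod_cast hlt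
        rw [if_pos hlt']
        have hget : PySem.List.pyGetD q (s : Int) ' ' = q.getD s ' ' := PySem.List.pyGetD_natCast q s ' '
        rw [hget, hcast, ih (s + 1) acc (frag ++ [q.getD s ' '])]
        rw [hps]
        simp only [pv_qslices, List.modifyHead, List.map_cons, List.length_cons]
        have hdrop : (q.drop s).take (p.length + 1)
            = q.getD s ' ' :: (q.drop (s + 1)).take p.length := by
          rw [List.drop_eq_getElem_cons hlt, List.take_succ_cons, List.getD_eq_getElem q ' ' hlt]
        rw [hdrop]
        have : s + 1 + p.length + 1 = s + (p.length + 1) + 1 := by omega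
        simp [this, List.append_assoc]
      · have hlt' : ¬ (s : Int) < (q.length : Int) := by
          intro h; exact hlt (by exact_mod_cast h)
        rw [if_neg hlt']
        rw [hcast, ih (s + 1) acc frag]
        rw [hps]
        simp only [pv_qslices, List.modifyHead, List.map_cons, List.length_cons]
        have hd1 : (q.drop s).take (p.length + 1) = (q.drop (s + 1)).take p.length := by
          rw [List.drop_eq_nil_of_le (by omega), List.drop_eq_nil_of_le (by omega)]
          simp
        rw [hd1]
        have : s + 1 + p.length + 1 = s + (p.length + 1) + 1 := by omega
        simp [this]

-- ===== VERDICT (by name: the statement is the Claim_ definition above) =====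
theorem split_qualities_based_on_sequence_spec : Claim_equal_split_qualities_based_on_sequence := by
  intro ns qs _
  unfold Spec_split_qualities_based_on_sequence
  unfold split_qualities_based_on_sequence split_qualities_based_on_sequence_alt
  have hsplit : (PySem.Str.split? ns "N").getD []
      = (List.splitOnP (fun c => c == 'N') ns.toList).map String.ofList := by
    rw [PySem.Str.split?]
    have : PySem.Chars.split? ns.toList "N".toList
        = some (PySem.Chars.splitOn ns.toList ['N']) := by
      simp [PySem.Chars.split?]
    rw [this]
    simp [pv_splitOn_eq]
  simp only [hsplit, List.map_map]
  have ha := pv_a_fold qs (List.splitOnP (fun c => c == 'N') ns.toList) 0 []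
  simp only [Nat.cast_zero, Function.comp_def] at ha ⊢
  rw [ha]
  simp only [PySem.Str.len_eq]
  have hb := pv_b_fold qs.toList ns.toList 0 [] []
  simp only [Nat.cast_zero] at hb
  refine (hb.trans ?_).symm
  obtain ⟨p, ps, hps⟩ := List.exists_cons_of_ne_nil (List.splitOnP_ne_nil (fun c => c == 'N') ns.toList)
  rw [hps]
  simp [pv_qslices, List.modifyHead]
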